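-- pv_equiv track=rewrite | github.com/viggo-gascou/EuroEval | src/scripts/create_gerlangmod.py | _convert_labels
-- ===== SOURCE A (Python) =====
-- def _convert_labels(raw_labels: list[str]) -> list[str]:
--     """Convert GerLangMod O/C/F labels to IOB2 O/B-ERR/I-ERR format.
--
--     Args:
--         raw_labels: List of raw labels ('O', 'C', or 'F').
--
--     Returns:
--         List of IOB2 labels. 'O' and 'C' become 'O'. The first 'F' in a
--         consecutive run becomes 'B-ERR' and subsequent 'F's become 'I-ERR'.
--     """
--     iob2 = []
--     prev = "O"
--     for label in raw_labels:
--         if label == "F":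
--             iob2.append("I-ERR" if prev == "F" else "B-ERR")
--         else:
--             iob2.append("O")
--         prev = label
--     return iob2
-- ===== SOURCE B (Python) =====
-- def _convert_labels(raw_labels: list[str]) -> list[str]:
--     """Run-length version: scan maximal runs of equal labels; an 'F' run of
--     length n yields 'B-ERR' + (n-1) * 'I-ERR', any other run yields n * 'O'."""
--     iob2 = []
--     i = 0
--     n = len(raw_labels)
--     while i < n:
--         j = i
--         while j < n and raw_labels[j] == raw_labels[i]:
--             j += 1
--         if raw_labels[i] == "F":
--             iob2.append("B-ERR")
--             iob2.extend(["I-ERR"] * (j - i - 1))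
--         else:
--             iob2.extend(["O"] * (j - i))
--         i = j
--     return iob2
-- ===== Notes on version B (the rewrite author's own statement) =====
-- stated objective: alternative
-- what changed: Replaces the element-by-element loop with a prev flag by a run-length scan over maximal runs of equal labels, emitting each run's tags in one step ('B-ERR' + (n-1) 'I-ERR' for an 'F' run, n 'O' otherwise).
import Mathlib
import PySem

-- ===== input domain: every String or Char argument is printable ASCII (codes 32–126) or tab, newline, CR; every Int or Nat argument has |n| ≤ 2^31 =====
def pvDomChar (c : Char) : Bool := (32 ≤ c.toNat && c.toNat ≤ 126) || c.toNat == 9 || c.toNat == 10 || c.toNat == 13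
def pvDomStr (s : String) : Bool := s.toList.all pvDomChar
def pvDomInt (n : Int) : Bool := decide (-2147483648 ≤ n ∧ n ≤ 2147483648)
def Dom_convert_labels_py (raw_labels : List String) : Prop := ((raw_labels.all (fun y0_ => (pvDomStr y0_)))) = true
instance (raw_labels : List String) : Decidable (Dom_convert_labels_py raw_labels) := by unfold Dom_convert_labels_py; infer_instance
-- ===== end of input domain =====

-- B replaces A's one-step prev flag by a run-length scan over maximal runs of equal
-- labels (alternative decomposition, same cost).

-- ===== PORT A =====
-- literal port of A's loop: accumulator (iob2, prev), appending per label
def convert_labels_py (raw_labels : List String) : List String :=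
  (raw_labels.foldl
    (fun (st : List String × String) label =>
      (st.1 ++ [if label == "F" then (if st.2 == "F" then "I-ERR" else "B-ERR") else "O"],
       label))
    ([], "O")).1

-- ===== PORT B =====
-- run-length decomposition: maximal runs of equal labels, as (key, length) pairs
def pvRuns : List String → List (String × Nat)
  | [] => []
  | x :: xs =>
    (x, 1 + (xs.takeWhile (· == x)).length) :: pvRuns (xs.dropWhile (· == x))
termination_by l => l.length
decreasing_by
  simp only [List.length_cons]
  exact Nat.lt_succ_of_le (List.length_dropWhile_le _ _)

def convert_labels_py_alt (raw_labels : List String) : List String :=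
  (pvRuns raw_labels).flatMap
    (fun kn =>
      if kn.1 == "F" then "B-ERR" :: List.replicate (kn.2 - 1) "I-ERR"
      else List.replicate kn.2 "O")

-- ===== PRECONDITION & SPEC =====
def Spec_convert_labels_py (raw_labels : List String) (out : List String) : Prop := out = convert_labels_py_alt raw_labels
instance (raw_labels : List String) (out : List String) : Decidable (Spec_convert_labels_py raw_labels out) := by unfold Spec_convert_labels_py; infer_instance

-- ===== CLAIM (what is proved, stated in full; the proofs are below) =====
def Claim_equal_convert_labels_py : Prop := ∀ (raw_labels : List String), Dom_convert_labels_py raw_labels → Spec_convert_labels_py raw_labels (convert_labels_py raw_labels)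

-- ===== LEMMAS AND PROOFS =====

-- A's loop in plain recursive form
def pvARec (prev : String) : List String → List String
  | [] => []
  | x :: xs =>
    (if x == "F" then (if prev == "F" then "I-ERR" else "B-ERR") else "O") :: pvARec x xs

theorem pvARec_foldl (l : List String) : ∀ (acc : List String) (p : String),
    (l.foldl
      (fun (st : List String × String) label =>
        (st.1 ++ [if label == "F" then (if st.2 == "F" then "I-ERR" else "B-ERR") else "O"],
         label))
      (acc, p)).1 = acc ++ pvARec p l := by
  induction l with
  | nil => intro acc p; simp [pvARec]
  | cons x xs ih =>
    intro acc p
    simp only [List.foldl_cons, pvARec, ih]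
    simp

-- prev only matters through whether it equals "F"
theorem pvARec_congr (p q : String) (l : List String) (h : (p == "F") = (q == "F")) :
    pvARec p l = pvARec q l := by
  cases l with
  | nil => rfl
  | cons x xs => simp [pvARec, h]

-- a run of elements all equal to x contributes replicated tags with prev = x
theorem pvARec_run (x : String) (t : List String) (ht : ∀ y ∈ t, y = x) (r : List String) :
    pvARec x (t ++ r) =
      List.replicate t.length (if x == "F" then "I-ERR" else "O") ++ pvARec x r := by
  induction t with
  | nil => simp
  | cons y t' ih =>
    have hy : y = x := ht y (by simp)
    subst hy
    simp only [List.cons_append, pvARec, List.length_cons, List.replicate_succ,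
      ih (fun z hz => ht z (by simp [hz]))]
    by_cases hx : (y == "F") = true <;> simp [hx]

theorem pvAlt_eq_pvARec (l : List String) : convert_labels_py_alt l = pvARec "O" l := by
  generalize hn : l.length = n
  induction n using Nat.strong_induction_on generalizing l with
  | _ n ih =>
  cases l with
  | nil => subst hn; simp [convert_labels_py_alt, pvRuns, pvARec]
  | cons x xs =>
    have hsplit : xs = xs.takeWhile (· == x) ++ xs.dropWhile (· == x) :=
      (List.takeWhile_append_dropWhile).symm
    have hlen : (xs.dropWhile (· == x)).length < n := by
      subst hn
      simp only [List.length_cons]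
      exact Nat.lt_succ_of_le (List.length_dropWhile_le _ _)
    have ihr := ih _ hlen (xs.dropWhile (· == x)) rfl
    have hmem : ∀ y ∈ xs.takeWhile (· == x), y = x := by
      intro y hy
      have := List.mem_takeWhile_imp hy
      simpa using this
    -- prev after the run is x; the next element (if any) differs from x
    have hcongr : pvARec x (xs.dropWhile (· == x)) = pvARec "O" (xs.dropWhile (· == x)) := by
      by_cases hx : (x == "F") = true
      · cases hd : xs.dropWhile (· == x) with
        | nil => rfl
        | cons z zs =>
          have hz : ¬ ((z == x) = true) := by
            have hne : xs.dropWhile (· == x) ≠ [] := by simp [hd]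
            have := List.head_dropWhile_not (· == x) hne
            simp only [hd] at this ⊢
            simpa using this
          have hzx : z = "F" → False := by
            intro h; apply hz; simp [h, (by simpa using hx : x = "F")]
          simp only [pvARec]
          have : (z == "F") = false := by
            by_cases h : z = "F"
            · exact absurd h hzx
            · simp [h]
          simp [this]
      · exact pvARec_congr x "O" _ (by simp at hx ⊢; simp [hx])
    calc convert_labels_py_alt (x :: xs)
        = (if x == "F" then "B-ERR" :: List.replicate (xs.takeWhile (· == x)).length "I-ERR"
           else List.replicate (1 + (xs.takeWhile (· == x)).length) "O")
          ++ convert_labels_py_alt (xs.dropWhile (· == x)) := by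
          simp only [convert_labels_py_alt, pvRuns, List.flatMap_cons]
          congr 1
          by_cases hx : (x == "F") = true <;> simp [hx]
      _ = pvARec "O" (x :: xs) := by
          rw [ihr] at *
          conv_rhs => rw [show (x :: xs) = x :: (xs.takeWhile (· == x) ++ xs.dropWhile (· == x)) by rw [← hsplit]]
          simp only [pvARec, pvARec_run x _ hmem, hcongr]
          by_cases hx : (x == "F") = true <;>
            simp [hx, List.replicate_succ, Nat.add_comm 1]

-- ===== VERDICT (by name: the statement is the Claim_ definition above) =====
theorem convert_labels_py_spec : Claim_equal_convert_labels_py := by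
  intro l _
  show convert_labels_py l = convert_labels_py_alt l
  rw [convert_labels_py, pvARec_foldl, pvAlt_eq_pvARec]
  simp
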